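-- pv_equiv track=rewrite | github.com/Enkhamgalan1230/SchemaDiscovery | schema_discovery/scoring/fk_score.py | _has_measure_tokens
-- ===== SOURCE A (Python) =====
-- def _has_measure_tokens(col: str) -> bool:
--     s = str(col).strip().lower()
--     tokens = [
--         "minute", "min", "time", "second",
--         "day", "month", "year",
--         "age", "score", "rating",
--         "stage", "round", "week",
--         "status", "flag", "type",
--         "count", "qty", "quantity",
--         "amount", "price", "total",
--     ]
--     return any(t in s for t in tokens)
-- ===== SOURCE B (Python) =====
-- _TOKENS = (
--     "minute min time second day month year age score rating "
--     "stage round week status flag type count qty quantity "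
--     "amount price total"
-- ).split()
--
-- _TOKEN_LENS = frozenset(len(t) for t in _TOKENS)
--
--
-- def _has_measure_tokens(col: str) -> bool:
--     # Materialize every fixed-length window of the normalized string once,
--     # as a set, then test the tokens against that set (hash lookups instead
--     # of 22 independent substring scans).
--     s = str(col).strip().lower()
--     windows = {s[i:i + n] for n in _TOKEN_LENS for i in range(len(s) - n + 1)}
--     return any(t in windows for t in _TOKENS)
-- ===== Notes on version B (the rewrite author's own statement) =====
-- stated objective: alternative
-- what changed: Instead of 22 independent `t in s` substring scans, B builds once the set of all fixed-length windows (slices) of the normalized string for the token lengths that occur, then answers by set membership of each token.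
import Mathlib
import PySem

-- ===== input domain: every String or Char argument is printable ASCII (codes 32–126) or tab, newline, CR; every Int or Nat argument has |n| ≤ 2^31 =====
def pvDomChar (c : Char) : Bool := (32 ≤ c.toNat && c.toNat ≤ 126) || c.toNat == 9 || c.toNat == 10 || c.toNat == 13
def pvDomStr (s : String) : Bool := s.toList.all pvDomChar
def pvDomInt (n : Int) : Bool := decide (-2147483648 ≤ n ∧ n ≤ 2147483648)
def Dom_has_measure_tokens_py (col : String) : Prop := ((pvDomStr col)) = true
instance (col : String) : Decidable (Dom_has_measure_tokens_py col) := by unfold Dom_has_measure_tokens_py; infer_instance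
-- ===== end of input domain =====

-- B replaces A's 22 independent `t in s` substring scans by one materialization of
-- every fixed-length window of the normalized string into a set, then set lookups
-- of the tokens; same normalization, same return value.

-- ===== PORT A =====
def has_measure_tokens_py (col : String) : Bool :=
  let s := PySem.Str.lower (PySem.Str.strip col)
  let tokens : List String :=
    ["minute", "min", "time", "second",
     "day", "month", "year",
     "age", "score", "rating",
     "stage", "round", "week",
     "status", "flag", "type",
     "count", "qty", "quantity",
     "amount", "price", "total"]
  tokens.any (fun t => PySem.Str.isIn t s)

-- ===== PORT B =====
-- _TOKENS = "minute min … total".split()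
def pvTokensB : List String :=
  PySem.Str.split₀ "minute min time second day month year age score rating stage round week status flag type count qty quantity amount price total"

-- _TOKEN_LENS = frozenset(len(t) for t in _TOKENS)
def pvTokenLens : PySem.Set Int :=
  PySem.Set.ofList (pvTokensB.map (fun t => PySem.Str.len t))

-- windows = {s[i:i+n] for n in _TOKEN_LENS for i in range(len(s)-n+1)}; any(t in windows …)
def has_measure_tokens_py_alt (col : String) : Bool :=
  let s := PySem.Chars.lower (PySem.Chars.strip col.toList)
  let windows : PySem.Set (List Char) :=
    PySem.Set.ofList (pvTokenLens.flatMap (fun n =>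
      (PySem.List.pyRange 0 ((s.length : Int) - n + 1) 1).map
        (fun i => PySem.List.slice s (some i) (some (i + n)))))
  pvTokensB.any (fun t => PySem.Set.contains windows t.toList)

-- ===== PRECONDITION & SPEC =====
def Spec_has_measure_tokens_py (col : String) (out : Bool) : Prop := out = has_measure_tokens_py_alt col
instance (col : String) (out : Bool) : Decidable (Spec_has_measure_tokens_py col out) := by unfold Spec_has_measure_tokens_py; infer_instance

-- ===== CLAIM (what is proved, stated in full; the proofs are below) =====
def Claim_equal_has_measure_tokens_py : Prop := ∀ (col : String), Dom_has_measure_tokens_py col → Spec_has_measure_tokens_py col (has_measure_tokens_py col)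

-- ===== LEMMAS AND PROOFS =====

set_option maxRecDepth 40000 in
theorem pv_lens_eq : pvTokenLens = [6, 3, 4, 5, 8] := by decide

-- a window s[i:i+n] (0 ≤ i, i+n ≤ len) that equals t is exactly an infix of length n
theorem pv_window_iff (cs t : List Char) (hn : (t.length : Int) ∈ pvTokenLens) :
    (∃ n ∈ pvTokenLens, ∃ i ∈ PySem.List.pyRange 0 ((cs.length : Int) - n + 1) 1,
        PySem.List.slice cs (some i) (some (i + n)) = t) ↔ t <:+: cs := by
  constructor
  · rintro ⟨n, hnmem, i, hi, hslice⟩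
    have hn0 : (0 : Int) ≤ n := by
      rw [pv_lens_eq] at hnmem
      simp only [List.mem_cons, List.not_mem_nil, or_false] at hnmem
      omega
    rw [PySem.List.mem_pyRange_one] at hi
    obtain ⟨hi0, _⟩ := hi
    rw [PySem.List.slice_toNat cs hi0 (by omega)] at hslice
    calc t = ((cs.drop i.toNat).take ((i + n).toNat - i.toNat)) := hslice.symm
    _ <:+: cs := ((List.take_prefix _ _).isInfix.trans (List.drop_suffix _ _).isInfix)
  · rintro ⟨p, q, hpq⟩
    refine ⟨(t.length : Int), hn, (p.length : Int), ?_, ?_⟩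
    · rw [PySem.List.mem_pyRange_one]
      constructor
      · positivity
      · have : cs.length = p.length + t.length + q.length := by
          subst hpq; simp [List.length_append]; omega
        omega
    · rw [PySem.List.slice_natCast_add]
      subst hpq
      simp

set_option maxRecDepth 40000 in
theorem pv_tokens_eq :
    pvTokensB = ["minute", "min", "time", "second", "day", "month", "year", "age",
      "score", "rating", "stage", "round", "week", "status", "flag", "type",
      "count", "qty", "quantity", "amount", "price", "total"] := by decide

-- ===== VERDICT (by name: the statement is the Claim_ definition above) =====
theorem has_measure_tokens_py_spec : Claim_equal_has_measure_tokens_py := by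
  intro col _
  show _ = _
  unfold has_measure_tokens_py has_measure_tokens_py_alt
  simp only [PySem.Str.isIn, PySem.Str.toList_lower, PySem.Str.toList_strip, pv_tokens_eq]
  set cs := PySem.Chars.lower (PySem.Chars.strip col.toList) with hcs
  rw [Bool.eq_iff_iff]
  simp only [List.any_eq_true, PySem.Chars.isIn_iff_infix, PySem.Set.contains_iff,
    PySem.Set.mem_ofList, List.mem_flatMap, List.mem_map]
  constructor
  · rintro ⟨t, ht, hinf⟩
    refine ⟨t, ht, ?_⟩
    have hn : (t.toList.length : Int) ∈ pvTokenLens := by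
      rw [pv_lens_eq]; fin_cases ht <;> decide
    obtain ⟨n, hn', i, hi, hs⟩ := (pv_window_iff cs t.toList hn).mpr hinf
    exact ⟨n, hn', i, hi, hs⟩
  · rintro ⟨t, ht, n, hn, i, hi, hs⟩
    have hn' : (t.toList.length : Int) ∈ pvTokenLens := by
      rw [pv_lens_eq]; fin_cases ht <;> decide
    exact ⟨t, ht, (pv_window_iff cs t.toList hn').mp ⟨n, hn, i, hi, hs⟩⟩
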